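-- pv_equiv track=rewrite | github.com/alexandraback/datacollection | solutions_5630113748090880_0/Python/atfelix/p2.py | count
-- ===== SOURCE A (Python) =====
-- def count(n, points):
--     count_dict = {}
--     for p in points:
--         for x in p:
--             count_dict.setdefault(x, 0)
--             count_dict[x] += 1
--     missing = [x for x in count_dict if count_dict[x] % 2 == 1]
--     missing.sort()
--     return ' '.join(str(x) for x in missing)
-- ===== SOURCE B (Python) =====
-- def count(n, points):
--     odd = set()
--     for p in points:
--         for x in p:
--             if x in odd:
--                 odd.discard(x)
--             else:
--                 odd.add(x)
--     missing = sorted(odd)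
--     return ' '.join(str(x) for x in missing)
-- ===== Notes on version B (the rewrite author's own statement) =====
-- stated objective: idiomatic
-- what changed: Replaces the frequency dict plus %2 filtering pass with a single set whose membership is toggled per occurrence, so the set holds exactly the odd-count values.
import Mathlib
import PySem

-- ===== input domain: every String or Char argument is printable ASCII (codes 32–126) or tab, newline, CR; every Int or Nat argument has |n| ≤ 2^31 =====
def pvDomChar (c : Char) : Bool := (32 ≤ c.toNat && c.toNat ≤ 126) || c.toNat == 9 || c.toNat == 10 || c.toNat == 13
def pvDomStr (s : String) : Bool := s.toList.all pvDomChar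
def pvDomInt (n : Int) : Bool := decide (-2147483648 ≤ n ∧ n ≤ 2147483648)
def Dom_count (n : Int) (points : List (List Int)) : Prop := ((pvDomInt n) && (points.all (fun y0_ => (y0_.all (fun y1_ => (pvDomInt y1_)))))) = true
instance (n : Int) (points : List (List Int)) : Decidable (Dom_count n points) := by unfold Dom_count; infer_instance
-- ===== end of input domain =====

-- B replaces the frequency dict + %2 filter with a single membership-toggled set (idiomatic parity tracking); same output.


-- ===== PORT A =====
def count (n : Int) (points : List (List Int)) : String :=
  let d : PySem.Dict Int Int :=
    points.foldl (fun d p =>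
      p.foldl (fun d x => (d.setdefault x 0).modify x 0 (· + 1)) d) PySem.Dict.empty
  let missing := d.keys.filter (fun x => PySem.Int.mod (d.getD x 0) 2 == 1)
  let missing := PySem.List.sorted missing (fun x => x)
  PySem.Str.join " " (missing.map PySem.Int.toStr)

-- ===== PORT B =====
def count_alt (n : Int) (points : List (List Int)) : String :=
  let odd : PySem.Set Int :=
    points.foldl (fun s p =>
      p.foldl (fun s x =>
        if PySem.Set.contains s x then PySem.Set.discard s x else PySem.Set.add s x) s)
      PySem.Set.empty
  let missing := PySem.List.sorted odd (fun x => x)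
  PySem.Str.join " " (missing.map PySem.Int.toStr)

-- ===== PRECONDITION & SPEC =====
def Spec_count (n : Int) (points : List (List Int)) (out : String) : Prop := out = count_alt n points
instance (n : Int) (points : List (List Int)) (out : String) : Decidable (Spec_count n points out) := by unfold Spec_count; infer_instance

-- ===== CLAIM (what is proved, stated in full; the proofs are below) =====
def Claim_equal_count : Prop := ∀ (n : Int) (points : List (List Int)), Dom_count n points → Spec_count n points (count n points)

-- ===== LEMMAS AND PROOFS =====

-- the setdefault-then-increment step of A is exactly Counter's modify step
theorem stepA_eq (d : PySem.Dict Int Int) (x : Int) :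
    (d.setdefault x 0).modify x 0 (· + 1) = d.modify x 0 (· + 1) := by
  by_cases h : d.contains x = true
  · rw [PySem.Dict.setdefault_of_contains d 0 h]
  · rw [PySem.Dict.setdefault_of_not_contains d 0 (by simpa using h)]
    unfold PySem.Dict.modify
    rw [PySem.Dict.getD_insert_self, PySem.Dict.insert_insert_self,
      PySem.Dict.getD_of_not_contains d 0 (by simpa using h)]

theorem dictA_eq (points : List (List Int)) :
    points.foldl (fun d p =>
      p.foldl (fun d x => (d.setdefault x 0).modify x 0 (· + 1)) d) PySem.Dict.empty
    = PySem.Dict.counter points.flatten := by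
  simp only [stepA_eq]
  rw [PySem.Dict.counter_eq_foldl, List.foldl_flatten]

-- B's toggle step
theorem toggle_mem (s : PySem.Set Int) (x y : Int) :
    y ∈ (if PySem.Set.contains s x then PySem.Set.discard s x else PySem.Set.add s x)
      ↔ (if y = x then ¬ x ∈ s else y ∈ s) := by
  by_cases hc : PySem.Set.contains s x
  · have hx : x ∈ s := by simpa [PySem.Set.contains] using hc
    simp only [hc, if_true, PySem.Set.discard, List.mem_filter]
    by_cases hy : y = x <;> simp [hy, hx]
  · have hx : ¬ x ∈ s := by simpa [PySem.Set.contains] using hc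
    simp only [hc, if_false, PySem.Set.mem_add]
    by_cases hy : y = x <;> simp [hy, hx]

theorem toggle_nodup (s : PySem.Set Int) (x : Int) (h : s.Nodup) :
    (if PySem.Set.contains s x then PySem.Set.discard s x else PySem.Set.add s x).Nodup := by
  unfold PySem.Set.discard PySem.Set.add
  by_cases hx : x ∈ s
  · simpa [PySem.Set.contains, hx] using h.filter _
  · have hne : ∀ a ∈ s, ¬ a = x := fun a ha hax => hx (hax ▸ ha)
    simp [PySem.Set.contains, hx, List.nodup_append, h]
    exact hne

theorem toggle_fold (l : List Int) : ∀ (s : PySem.Set Int), s.Nodup →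
    (List.foldl (fun s x =>
      if PySem.Set.contains s x then PySem.Set.discard s x else PySem.Set.add s x) s l).Nodup
    ∧ ∀ y : Int,
      (y ∈ List.foldl (fun s x =>
        if PySem.Set.contains s x then PySem.Set.discard s x else PySem.Set.add s x) s l
       ↔ (y ∈ s ↔ l.count y % 2 = 0)) := by
  induction l with
  | nil => intro s hs; exact ⟨hs, by simp⟩
  | cons x t ih =>
    intro s hs
    obtain ⟨hnd, hmem⟩ := ih _ (toggle_nodup s x hs)
    refine ⟨hnd, fun y => ?_⟩
    rw [List.foldl_cons, hmem y, toggle_mem]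
    by_cases hy : y = x
    · subst hy
      by_cases hm : y ∈ s
      · simp only [hm, List.count_cons_self, if_true, iff_true, iff_false, true_iff,
          false_iff, not_true_eq_false, eq_self_iff_true]
        omega
      · simp only [hm, List.count_cons_self, if_true, iff_true, iff_false, true_iff,
          false_iff, not_false_eq_true, eq_self_iff_true]
        omega
    · have hxy : ¬ x = y := fun h => hy h.symm
      simp [hy, hxy, List.count_cons]

theorem oddB_spec (flat : List Int) :
    (List.foldl (fun s x =>
      if PySem.Set.contains s x then PySem.Set.discard s x else PySem.Set.add s x)
      PySem.Set.empty flat).Nodup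
    ∧ ∀ y : Int,
      (y ∈ List.foldl (fun s x =>
        if PySem.Set.contains s x then PySem.Set.discard s x else PySem.Set.add s x)
        PySem.Set.empty flat
       ↔ flat.count y % 2 = 1) := by
  obtain ⟨hnd, hmem⟩ := toggle_fold flat PySem.Set.empty (by simp [PySem.Set.empty])
  refine ⟨hnd, fun y => ?_⟩
  rw [hmem y]
  simp only [PySem.Set.empty]
  constructor
  · intro h
    simp only [List.not_mem_nil, false_iff] at h; omega
  · intro h
    simp only [List.not_mem_nil, false_iff]; omega

theorem fmod_two_count (c : Nat) :
    (PySem.Int.mod (c : Int) 2 == 1) = decide (c % 2 = 1) := by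
  unfold PySem.Int.mod
  have he : Int.fmod (c : Int) 2 = (c : Int) % 2 := by simp [Int.fmod_eq_emod]
  rw [he]
  by_cases h : c % 2 = 1
  · have h2 : (c : Int) % 2 = 1 := by omega
    simp [h2, h]
  · have h2 : (c : Int) % 2 = 0 := by omega
    simp [h2, h]

theorem missing_perm (points : List (List Int)) :
    ((PySem.Set.ofList points.flatten).filter
      (fun x => PySem.Int.mod ((PySem.Dict.counter points.flatten).getD x 0) 2 == 1)).Perm
    (List.foldl (fun s p =>
      List.foldl (fun s x =>
        if PySem.Set.contains s x then PySem.Set.discard s x else PySem.Set.add s x) s p)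
      PySem.Set.empty points) := by
  rw [← List.foldl_flatten]
  obtain ⟨hndB, hmemB⟩ := oddB_spec points.flatten
  apply (List.perm_ext_iff_of_nodup ((PySem.Set.nodup_ofList points.flatten).filter _) hndB).2
  intro y
  rw [hmemB y, List.mem_filter, PySem.Dict.getD_counter, fmod_two_count,
    decide_eq_true_iff, PySem.Set.mem_ofList]
  constructor
  · exact fun ⟨_, h⟩ => h
  · intro h
    refine ⟨?_, h⟩
    have : points.flatten.count y ≠ 0 := by omega
    exact List.count_pos_iff.1 (Nat.pos_of_ne_zero this)

-- ===== VERDICT (by name: the statement is the Claim_ definition above) =====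
theorem count_spec : Claim_equal_count := by
  intro n points _
  unfold Spec_count count count_alt
  simp only [dictA_eq, PySem.Dict.keys_counter]
  congr 1
  congr 1
  exact PySem.List.sorted_eq_sorted_of_perm _ _ _ (fun a b h => h) (missing_perm points)
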